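-- pv_equiv track=rewrite | github.com/mkasa/wut | wut/utils.py | truncate_pane_output
-- ===== SOURCE A (Python) =====
-- MAX_CHARS = 10000
--
-- def truncate_chars(text: str, reverse: bool = False) -> str:
--     return text[-MAX_CHARS:] if reverse else text[:MAX_CHARS]
--
-- def truncate_pane_output(output: str) -> str:
--     hit_non_empty_line = False
--     lines = []  # Order: newest to oldest
--     for line in reversed(output.splitlines()):
--         if line and line.strip():
--             hit_non_empty_line = True
--
--         if hit_non_empty_line:
--             lines.append(line)
--
--     lines = lines[1:]  # Remove wut command
--     output = "\n".join(reversed(lines))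
--     output = truncate_chars(output, reverse=True)
--     output = output.strip()
--
--     return output
-- ===== SOURCE B (Python) =====
-- MAX_CHARS = 10000
--
-- def truncate_pane_output(output: str) -> str:
--     lines = output.splitlines()
--     while lines and not lines[-1].strip():
--         lines.pop()
--     out = "\n".join(lines[:-1])  # drop the wut command line
--     return out[-MAX_CHARS:].strip()
-- ===== Notes on version B (the rewrite author's own statement) =====
-- stated objective: simpler
-- what changed: Replaces A's reversed-iteration with a hit flag accumulating lines newest-to-oldest and re-reversing by a direct while-loop that pops trailing whitespace-only lines from splitlines() and then slices off the last line.
import Mathlib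
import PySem

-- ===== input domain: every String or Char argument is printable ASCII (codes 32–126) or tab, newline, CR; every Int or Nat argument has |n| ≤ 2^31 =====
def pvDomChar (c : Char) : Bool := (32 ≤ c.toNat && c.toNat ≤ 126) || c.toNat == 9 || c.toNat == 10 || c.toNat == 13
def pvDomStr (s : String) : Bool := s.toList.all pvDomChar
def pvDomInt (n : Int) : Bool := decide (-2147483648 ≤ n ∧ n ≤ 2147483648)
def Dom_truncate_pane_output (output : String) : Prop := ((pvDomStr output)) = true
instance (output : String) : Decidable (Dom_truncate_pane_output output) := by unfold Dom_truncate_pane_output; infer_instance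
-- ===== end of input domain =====

-- B replaces A's reversed-iteration-with-flag by popping trailing blank lines and slicing; objective: simpler.

-- ===== PORT A =====
def MAX_CHARS : Int := 10000

def truncate_chars (text : String) (reverse : Bool) : String :=
  if reverse then PySem.Str.slice text (some (-MAX_CHARS)) none
  else PySem.Str.slice text none (some MAX_CHARS)

-- the loop body of A: state = (hit_non_empty_line, lines)
def aStep (s : Bool × List String) (line : String) : Bool × List String :=
  let hit := s.1 || (decide (line ≠ "") && decide (PySem.Str.strip line ≠ ""))
  (hit, if hit then s.2 ++ [line] else s.2)

def truncate_pane_output (output : String) : String :=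
  let st := ((PySem.Str.splitlines output).reverse).foldl aStep (false, [])
  let lines := PySem.List.slice st.2 (some 1) none  -- lines[1:] removes wut command
  let out := PySem.Str.join "\n" lines.reverse
  let out := truncate_chars out true
  PySem.Str.strip out

-- ===== PORT B =====
-- while lines and not lines[-1].strip(): lines.pop()
def bTrim (ls : List String) : List String :=
  if h : ls = [] then []
  else if PySem.Str.strip (ls.getLast h) = "" then bTrim ls.dropLast
  else ls
termination_by ls.length
decreasing_by
  simp only [List.length_dropLast]
  have : ls.length ≠ 0 := fun hn => h (List.eq_nil_of_length_eq_zero hn)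
  omega

def truncate_pane_output_alt (output : String) : String :=
  let lines := bTrim (PySem.Str.splitlines output)
  let out := PySem.Str.join "\n" (PySem.List.slice lines none (some (-1)))  -- lines[:-1]
  PySem.Str.strip (PySem.Str.slice out (some (-10000)) none)  -- out[-MAX_CHARS:].strip()

-- ===== PRECONDITION & SPEC =====
def Spec_truncate_pane_output (output : String) (out : String) : Prop := out = truncate_pane_output_alt output
instance (output : String) (out : String) : Decidable (Spec_truncate_pane_output output out) := by unfold Spec_truncate_pane_output; infer_instance

-- ===== CLAIM (what is proved, stated in full; the proofs are below) =====
def Claim_equal_truncate_pane_output : Prop := ∀ (output : String), Dom_truncate_pane_output output → Spec_truncate_pane_output output (truncate_pane_output output)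

-- ===== LEMMAS AND PROOFS =====

-- the skip condition of both loops, as a predicate
def pvBlank (l : String) : Bool := PySem.Str.strip l == ""

lemma foldl_aStep_true (ls : List String) (acc : List String) :
    ls.foldl aStep (true, acc) = (true, acc ++ ls) := by
  induction ls generalizing acc with
  | nil => simp
  | cons x xs ih => simp [aStep, ih]

lemma foldl_aStep_false (ls : List String) :
    (ls.foldl aStep (false, [])).2 = ls.dropWhile pvBlank := by
  induction ls with
  | nil => rfl
  | cons x xs ih =>
    by_cases hs : PySem.Str.strip x = ""
    · simpa [List.foldl_cons, aStep, hs, List.dropWhile_cons, pvBlank] using ih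
    · have hx : x ≠ "" := by intro h; subst h; exact hs rfl
      simp [List.foldl_cons, aStep, hs, hx, List.dropWhile_cons, pvBlank,
        foldl_aStep_true]

lemma bTrim_eq (ls : List String) :
    bTrim ls = (ls.reverse.dropWhile pvBlank).reverse := by
  induction ls using List.reverseRecOn with
  | nil => simp [bTrim]
  | append_singleton xs a ih =>
    rw [bTrim]
    have hne : xs ++ [a] ≠ [] := by simp
    by_cases ha : PySem.Str.strip a = ""
    · have hb : pvBlank a = true := by simp [pvBlank, ha]
      simp [hne, ha, ih, hb]
    · have hb : pvBlank a = false := by simp [pvBlank, ha]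
      simp [hne, ha, hb]

lemma dropLast_reverse_eq (xs : List String) :
    xs.reverse.dropLast = xs.tail.reverse := by
  cases xs with
  | nil => rfl
  | cons x xs => simp [List.reverse_cons]

-- ===== VERDICT (by name: the statement is the Claim_ definition above) =====
theorem truncate_pane_output_spec : Claim_equal_truncate_pane_output := by
  intro output _
  unfold Spec_truncate_pane_output truncate_pane_output truncate_pane_output_alt
  simp only [truncate_chars, if_pos, PySem.List.slice_from_one,
    PySem.List.slice_to_neg_one, MAX_CHARS]
  rw [foldl_aStep_false, bTrim_eq, dropLast_reverse_eq]
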